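-- pv_equiv track=rewrite | github.com/Evgya/Python | Yandex_training_1.0/6/G. Square/Square.py | get_max_width
-- ===== SOURCE A (Python) =====
-- def get_max_width(n, m, t):
--     left_border = 0
--     right_border = min(n, m)//2
--     while left_border < right_border:
--         width = (left_border + right_border + 1)//2
--         if n*m - (n - 2*width)*(m - 2*width) <= t:
--             left_border = width
--         else:
--             right_border = width - 1
--     return left_border
-- ===== SOURCE B (Python) =====
-- def get_max_width(n, m, t):
--     hi = min(n, m) // 2
--     result = 0
--     w = 1
--     while w <= hi:
--         if n*m - (n - 2*w)*(m - 2*w) <= t: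
--             result = w
--             w += 1
--         else:
--             break
--     return result
-- ===== Notes on version B (the rewrite author's own statement) =====
-- stated objective: alternative
-- what changed: A's binary search over the border width is replaced by a linear scan from width 1 upward that records the last width whose frame area fits and breaks at the first that does not (area is monotone in the width).
import Mathlib
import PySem

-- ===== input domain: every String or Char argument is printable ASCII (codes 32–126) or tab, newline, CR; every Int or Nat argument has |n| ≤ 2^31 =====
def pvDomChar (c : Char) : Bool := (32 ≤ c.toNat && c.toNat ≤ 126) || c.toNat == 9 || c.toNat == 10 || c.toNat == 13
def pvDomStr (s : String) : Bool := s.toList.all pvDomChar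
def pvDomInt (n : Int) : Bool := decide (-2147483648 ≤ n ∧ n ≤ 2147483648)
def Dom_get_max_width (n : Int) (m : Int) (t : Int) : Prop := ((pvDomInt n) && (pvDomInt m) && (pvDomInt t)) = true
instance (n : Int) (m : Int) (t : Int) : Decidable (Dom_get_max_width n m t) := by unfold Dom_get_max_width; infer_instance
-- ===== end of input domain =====

-- B replaces A's binary search over the border width by a linear scan with early break
-- over the candidate widths (alternative decomposition; not claimed faster).

-- ===== PORT A =====
-- midpoint bounds, cited by gmwLoop's decreasing_by
theorem gmwMid_bounds (l r : Int) (h : l < r) :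
    l < PySem.Int.floordiv (l + r + 1) 2 ∧ PySem.Int.floordiv (l + r + 1) 2 ≤ r := by
  rw [PySem.Int.floordiv_eq_ediv_of_pos (by omega : (0:Int) < 2)]
  omega

-- the 'while left_border < right_border' loop of A
def gmwLoop (n : Int) (m : Int) (t : Int) (l : Int) (r : Int) : Int :=
  if h : l < r then
    let w := PySem.Int.floordiv (l + r + 1) 2
    if n * m - (n - 2 * w) * (m - 2 * w) ≤ t then gmwLoop n m t w r
    else gmwLoop n m t l (w - 1)
  else l
termination_by (r - l).toNat
decreasing_by
  · have := gmwMid_bounds l r h; omega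
  · have := gmwMid_bounds l r h; omega

def get_max_width (n : Int) (m : Int) (t : Int) : Int :=
  gmwLoop n m t 0 (PySem.Int.floordiv (min n m) 2)

-- ===== PORT B =====
-- the 'while w <= hi' loop of B (with its early break)
def gmwScan (n : Int) (m : Int) (t : Int) (hi : Int) (w : Int) (result : Int) : Int :=
  if h : w ≤ hi then
    if n * m - (n - 2 * w) * (m - 2 * w) ≤ t then gmwScan n m t hi (w + 1) w
    else result
  else result
termination_by (hi + 1 - w).toNat
decreasing_by omega

def get_max_width_alt (n : Int) (m : Int) (t : Int) : Int :=
  gmwScan n m t (PySem.Int.floordiv (min n m) 2) 1 0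

-- ===== PRECONDITION & SPEC =====
def Spec_get_max_width (n : Int) (m : Int) (t : Int) (out : Int) : Prop := out = get_max_width_alt n m t
instance (n : Int) (m : Int) (t : Int) (out : Int) : Decidable (Spec_get_max_width n m t out) := by unfold Spec_get_max_width; infer_instance

-- ===== CLAIM (what is proved, stated in full; the proofs are below) =====
def Claim_equal_get_max_width : Prop := ∀ (n : Int) (m : Int) (t : Int), Dom_get_max_width n m t → Spec_get_max_width n m t (get_max_width n m t)

-- ===== LEMMAS AND PROOFS =====

-- a is "the answer": in range, 0 or feasible, and every larger admissible width is infeasible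
def gmwChar (n : Int) (m : Int) (t : Int) (hi : Int) (a : Int) : Prop :=
  0 ≤ a ∧ a ≤ max hi 0 ∧ (a = 0 ∨ n * m - (n - 2 * a) * (m - 2 * a) ≤ t) ∧
  ∀ v, a < v → v ≤ hi → ¬ (n * m - (n - 2 * v) * (m - 2 * v) ≤ t)

-- the frame area is monotone in the width on [0, min(n,m)/2]
theorem gmwArea_mono (n m a b : Int) (_h1 : 0 ≤ a) (hab : a ≤ b) (hb : 2 * b ≤ min n m) :
    n * m - (n - 2 * a) * (m - 2 * a) ≤ n * m - (n - 2 * b) * (m - 2 * b) := by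
  have hn : 2 * b ≤ n := le_trans hb (min_le_left _ _)
  have hm : 2 * b ≤ m := le_trans hb (min_le_right _ _)
  have key : 0 ≤ (b - a) * (n + m - 2 * a - 2 * b) := mul_nonneg (by omega) (by omega)
  nlinarith [key]

theorem gmwChar_uniq (n m t hi a b : Int) (_hmin : 2 * hi ≤ min n m)
    (ha : gmwChar n m t hi a) (hb : gmwChar n m t hi b) : a = b := by
  obtain ⟨ha0, ham, haf, hal⟩ := ha
  obtain ⟨hb0, hbm, hbf, hbl⟩ := hb
  by_contra hne
  rcases lt_or_gt_of_ne hne with h | h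
  · -- a < b, so b ≥ 1, b feasible, b ≤ hi, contradicting a's maximality
    have hb1 : 1 ≤ b := by omega
    have hbhi : b ≤ hi := by omega
    exact hal b h hbhi (hbf.resolve_left (by omega))
  · have ha1 : 1 ≤ a := by omega
    have hahi : a ≤ hi := by omega
    exact hbl a h hahi (haf.resolve_left (by omega))

theorem gmwScan_char (n m t hi : Int) (hmin : 2 * hi ≤ min n m) :
    ∀ (k : Nat) (w result : Int), (hi + 1 - w).toNat ≤ k → 1 ≤ w → result = w - 1 →
      (result = 0 ∨ (n * m - (n - 2 * result) * (m - 2 * result) ≤ t ∧ result ≤ hi)) →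
      gmwChar n m t hi (gmwScan n m t hi w result) := by
  intro k
  induction k with
  | zero =>
    intro w result hk hw hres hfeas
    rw [gmwScan]
    have : ¬ w ≤ hi := by omega
    simp only [this, dite_false]
    exact ⟨by omega, by omega, by omega, fun v hv1 hv2 _ => by omega⟩
  | succ k ih =>
    intro w result hk hw hres hfeas
    rw [gmwScan]
    by_cases hwhi : w ≤ hi
    · simp only [hwhi, dite_true]
      by_cases hP : n * m - (n - 2 * w) * (m - 2 * w) ≤ t
      · simp only [hP, if_true]
        exact ih (w + 1) w (by omega) (by omega) (by omega) (Or.inr ⟨hP, hwhi⟩)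
      · simp only [hP, if_false]
        refine ⟨by omega, by omega, by omega, fun v hv1 hv2 hPv => ?_⟩
        -- v ≥ w and feasible would make w feasible by monotonicity
        exact hP (le_trans (gmwArea_mono n m w v (by omega) (by omega) (by omega)) hPv)
    · simp only [hwhi, dite_false]
      exact ⟨by omega, by omega, by omega, fun v hv1 hv2 _ => by omega⟩

theorem gmwLoop_char (n m t hi : Int) (hmin : 2 * hi ≤ min n m) :
    ∀ (k : Nat) (l r : Int), (r - l).toNat ≤ k → 0 ≤ l → l ≤ r → r ≤ hi →
      (l = 0 ∨ n * m - (n - 2 * l) * (m - 2 * l) ≤ t) →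
      (∀ v, r < v → v ≤ hi → ¬ (n * m - (n - 2 * v) * (m - 2 * v) ≤ t)) →
      gmwChar n m t hi (gmwLoop n m t l r) := by
  intro k
  induction k with
  | zero =>
    intro l r hk h0 hlr hr hfeas hmax
    rw [gmwLoop]
    have : ¬ l < r := by omega
    simp only [this, dite_false]
    exact ⟨h0, by omega, hfeas, fun v hv1 hv2 => hmax v (by omega) hv2⟩
  | succ k ih =>
    intro l r hk h0 hlr hr hfeas hmax
    rw [gmwLoop]
    by_cases hlt : l < r
    · simp only [hlt, dite_true]
      obtain ⟨hw1, hw2⟩ := gmwMid_bounds l r hlt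
      set w := PySem.Int.floordiv (l + r + 1) 2 with hwdef
      by_cases hP : n * m - (n - 2 * w) * (m - 2 * w) ≤ t
      · simp only [hP, if_true]
        exact ih w r (by omega) (by omega) (by omega) hr (Or.inr hP) hmax
      · simp only [hP, if_false]
        refine ih l (w - 1) (by omega) h0 (by omega) (by omega) hfeas ?_
        intro v hv1 hv2 hPv
        by_cases hvr : r < v
        · exact hmax v hvr hv2 hPv
        · -- w ≤ v ≤ r ≤ hi, feasibility of v gives feasibility of w
          exact hP (le_trans (gmwArea_mono n m w v (by omega) (by omega) (by omega)) hPv)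
    · simp only [hlt, dite_false]
      exact ⟨h0, by omega, hfeas, fun v hv1 hv2 => hmax v (by omega) hv2⟩

-- ===== VERDICT (by name: the statement is the Claim_ definition above) =====
theorem get_max_width_spec : Claim_equal_get_max_width := by
  intro n m t _
  unfold Spec_get_max_width get_max_width get_max_width_alt
  set hi := PySem.Int.floordiv (min n m) 2 with hhi
  have hmin : 2 * hi ≤ min n m := by
    rw [hhi, PySem.Int.floordiv_eq_ediv_of_pos (by omega : (0:Int) < 2)]
    omega
  by_cases hpos : 0 < hi
  · apply gmwChar_uniq n m t hi _ _ hmin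
    · exact gmwLoop_char n m t hi hmin (hi - 0).toNat 0 hi (by omega) (by omega)
        (by omega) (by omega) (Or.inl rfl) (fun v hv1 hv2 => by omega)
    · exact gmwScan_char n m t hi hmin (hi + 1 - 1).toNat 1 0 (by omega) (by omega)
        (by omega) (Or.inl rfl)
  · rw [gmwLoop, gmwScan]
    simp only [show ¬ (0:Int) < hi from hpos, show ¬ (1:Int) ≤ hi by omega, dite_false]
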